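-- pv_equiv track=rewrite | github.com/Birdyyz/Universidade | LA2/anel.py | anel
-- ===== SOURCE A (Python) =====
-- def e_primo(n):
--     for x in range(2, n):
--         if n % x == 0:
--             return False
--     return True
--
-- def anel(n):
--     if n % 2 != 0:
--         return []
--     usado = [False] * (n + 1)
--     sequencia = [1]
--
--     def backtrack():
--         if len(sequencia) == n:
--             return e_primo(sequencia[-1]+sequencia[0])
--
--         for i in range(2,n+1):
--             if not usado[i] and e_primo(sequencia[-1]+i):
--                 usado[i] = True
--                 sequencia.append(i)
--                 if backtrack():
--                     return True
--                 usado[i] = False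
--                 sequencia.pop()
--         return False
--
--     if backtrack():
--         return sequencia
--     return None
-- ===== SOURCE B (Python) =====
-- def anel(n):
--     # B: precompute a prime table and adjacency lists once, then run the DFS
--     # iteratively with an explicit stack of pending-candidate lists instead of
--     # A's recursive backtrack() that re-runs trial division at every node.
--     if n % 2 != 0:
--         return []
--
--     def e_primo(m):
--         for x in range(2, m):
--             if m % x == 0:
--                 return False
--         return True
--
--     prime = [e_primo(s) for s in range(2 * n + 2)]
--     adj = {i: [j for j in range(2, n + 1) if prime[i + j]] for i in range(1, n + 1)}
--
--     seq = [1]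
--     stack = [list(adj.get(1, []))]  # stack[-1]: candidates still to try at the current depth
--     while stack:
--         if len(seq) == n and prime[seq[-1] + seq[0]]:
--             return seq
--         top = stack[-1]
--         if len(seq) < n and top:
--             j = top.pop(0)
--             if j not in seq:
--                 seq.append(j)
--                 stack.append(list(adj[j]))
--         else:
--             stack.pop()
--             if stack:
--                 seq.pop()
--     return None
-- ===== Notes on version B (the rewrite author's own statement) =====
-- stated objective: alternative
-- what changed: B replaces A's recursive backtrack() (which rescans range(2,n+1) and re-runs trial division at every node over a mutable usado array) by an iterative search loop driven by an explicit stack of pending-candidate lists drawn from a once-precomputed prime table and adjacency lists, testing 'j not in seq' instead of a boolean array and closing via the prime table.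
import Mathlib
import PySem

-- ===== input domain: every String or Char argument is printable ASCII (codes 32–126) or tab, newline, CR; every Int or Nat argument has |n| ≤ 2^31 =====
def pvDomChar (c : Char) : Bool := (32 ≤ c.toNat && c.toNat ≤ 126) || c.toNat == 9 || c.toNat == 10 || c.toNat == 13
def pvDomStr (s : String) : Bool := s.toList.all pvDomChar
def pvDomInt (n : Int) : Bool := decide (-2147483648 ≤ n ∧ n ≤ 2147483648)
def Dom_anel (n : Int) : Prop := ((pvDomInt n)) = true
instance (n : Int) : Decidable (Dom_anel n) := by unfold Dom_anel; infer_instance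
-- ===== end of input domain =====

-- B replaces A's recursive backtracking (per-node trial division over range(2,n+1))
-- by an iterative loop over an explicit stack of pending-candidate lists taken from
-- precomputed prime/adjacency tables; objective: alternative (same first solution).

-- ===== PORT A =====
-- e_primo: 'for x in range(2, n): if n % x == 0: return False / return True'
def pvTrialA (m : Int) : List Int → Bool
  | [] => true
  | x :: xs => if PySem.Int.mod m x == 0 then false else pvTrialA m xs

def e_primoA (m : Int) : Bool := pvTrialA m (PySem.List.pyRange 2 m 1)

-- backtrack(): the mutated 'usado'/'sequencia' are passed as state (Python restores
-- them on failure with usado[i]=False / pop, so the failing branch continues with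
-- the caller's unchanged state, exactly as here).  usado[i] is read/written only at
-- i ∈ range(2, n+1), in range for the list [False]*(n+1), so pyGetD/pySetD are exact.
-- 'fuel' only makes the recursion total; it is never exhausted on reachable states
-- (each nested call grows 'sequencia' by one towards n, where the base case stops).
mutual
def pvBtA (n : Int) (fuel : Nat) (usado : List Bool) (seq : List Int) : Option (List Int) :=
  if PySem.List.len seq == n then
    if e_primoA (PySem.List.pyGetD seq (-1) 0 + PySem.List.pyGetD seq 0 0) then some seq else none
  else
    match fuel with
    | 0 => none
    | Nat.succ f => pvLoopA n f usado seq (PySem.List.pyRange 2 (n + 1) 1)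
termination_by (fuel, 0)

def pvLoopA (n : Int) (fuel : Nat) (usado : List Bool) (seq : List Int) : List Int → Option (List Int)
  | [] => none
  | i :: rest =>
    if !(PySem.List.pyGetD usado i false) && e_primoA (PySem.List.pyGetD seq (-1) 0 + i) then
      match pvBtA n fuel (PySem.List.pySetD usado i true) (seq ++ [i]) with
      | some s => some s
      | none => pvLoopA n fuel usado seq rest
    else pvLoopA n fuel usado seq rest
termination_by cands => (fuel, cands.length + 1)
end

def anel (n : Int) : Option (List Int) :=
  if PySem.Int.mod n 2 != 0 then some [] else
    pvBtA n (n.toNat + 1) (List.replicate (n + 1).toNat false) [1]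

-- ===== PORT B =====
def pvTrialB (m : Int) : List Int → Bool
  | [] => true
  | x :: xs => if PySem.Int.mod m x == 0 then false else pvTrialB m xs

def e_primoB (m : Int) : Bool := pvTrialB m (PySem.List.pyRange 2 m 1)

-- prime = [e_primo(s) for s in range(2*n + 2)]
def pvPrimeTblB (n : Int) : List Bool :=
  (PySem.List.pyRange 0 (2 * n + 2) 1).map (fun s => e_primoB s)

-- adj = {i: [j for j in range(2, n+1) if prime[i+j]] for i in range(1, n+1)}
-- (prime[i+j] is read at i+j ∈ 3..2n, in range for the table, so pyGetD is exact)
def pvAdjB (n : Int) (prime : List Bool) : PySem.Dict Int (List Int) :=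
  (PySem.List.pyRange 1 (n + 1) 1).foldl
    (fun d i => d.insert i ((PySem.List.pyRange 2 (n + 1) 1).filter
      (fun j => PySem.List.pyGetD prime (i + j) false)))
    PySem.Dict.empty

-- the 'while stack:' loop of Source B; state = (stack of pending-candidate lists, seq),
-- one fuel unit per iteration ('fuel' only makes the loop total: the proof below
-- shows the run returns before exhausting the bound anel_alt passes in).
-- prime[seq[-1]+seq[0]] is read only when len(seq)==n, index in 3..n+1: in range, so
-- pyGetD is exact; adj[j] has key j ∈ 2..n always present, so getD is exact;
-- seq.pop() pops the last element (seq is nonempty there) = dropLast.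
def pvRunB (n : Int) (prime : List Bool) (adj : PySem.Dict Int (List Int)) :
    Nat → List (List Int) → List Int → Option (List Int)
  | 0, _, _ => none
  | _ + 1, [], _ => none
  | f + 1, top :: rest, seq =>
    if (PySem.List.len seq == n) &&
        PySem.List.pyGetD prime (PySem.List.pyGetD seq (-1) 0 + PySem.List.pyGetD seq 0 0) false
    then some seq
    else if decide (PySem.List.len seq < n) && !top.isEmpty then
      -- j = top.pop(0)  (top is nonempty here, so headD/tail are exact)
      if seq.contains (top.headD 0) then
        pvRunB n prime adj f (top.tail :: rest) seq
      else
        pvRunB n prime adj f (adj.getD (top.headD 0) [] :: top.tail :: rest)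
          (seq ++ [top.headD 0])
    else
      -- stack.pop(); if stack: seq.pop()
      pvRunB n prime adj f rest (if rest.isEmpty then seq else seq.dropLast)

def anel_alt (n : Int) : Option (List Int) :=
  if PySem.Int.mod n 2 != 0 then some [] else
    pvRunB n (pvPrimeTblB n) (pvAdjB n (pvPrimeTblB n))
      ((n.toNat + 2) ^ (n.toNat + 2))
      [(pvAdjB n (pvPrimeTblB n)).getD 1 []] [1]

-- ===== PRECONDITION & SPEC =====
def Spec_anel (n : Int) (out : Option (List Int)) : Prop := out = anel_alt n
instance (n : Int) (out : Option (List Int)) : Decidable (Spec_anel n out) := by unfold Spec_anel; infer_instance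

-- ===== CLAIM (what is proved, stated in full; the proofs are below) =====
def Claim_equal_anel : Prop := ∀ (n : Int), Dom_anel n → Spec_anel n (anel n)

-- ===== LEMMAS AND PROOFS =====

lemma pvTrial_eq (m : Int) (l : List Int) : pvTrialA m l = pvTrialB m l := by
  induction l with
  | nil => rfl
  | cons x xs ih => simp [pvTrialA, pvTrialB, ih]

lemma e_primo_eq (m : Int) : e_primoA m = e_primoB m := by
  simp [e_primoA, e_primoB, pvTrial_eq]

lemma getD_foldl_insert_not_mem (F : Int → List Int) (L : List Int) (i : Int)
    (h : i ∉ L) : ∀ d : PySem.Dict Int (List Int),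
    (L.foldl (fun d k => d.insert k (F k)) d).getD i [] = d.getD i [] := by
  induction L with
  | nil => intro d; rfl
  | cons a L' ih =>
    intro d
    simp only [List.mem_cons, not_or] at h
    simp only [List.foldl_cons]
    rw [ih h.2, PySem.Dict.getD_insert_of_ne _ _ _ h.1]

lemma getD_foldl_insert (F : Int → List Int) (L : List Int) (i : Int)
    (hmem : i ∈ L) (hnd : L.Nodup) : ∀ d : PySem.Dict Int (List Int),
    (L.foldl (fun d k => d.insert k (F k)) d).getD i [] = F i := by
  induction L with
  | nil => cases hmem
  | cons a L' ih =>
    intro d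
    simp only [List.foldl_cons]
    rcases List.mem_cons.mp hmem with h | h
    · subst h
      rw [getD_foldl_insert_not_mem F L' i (List.nodup_cons.mp hnd).1,
        PySem.Dict.getD_insert_self]
    · exact ih h (List.nodup_cons.mp hnd).2 _

-- B's filtered candidate list for a tail value l
def pvFilt (prime : List Bool) (l : Int) (R : List Int) : List Int :=
  R.filter (fun j => PySem.List.pyGetD prime (l + j) false)

lemma adj_getD (n i : Int) (h1 : 1 ≤ i) (h2 : i ≤ n) :
    (pvAdjB n (pvPrimeTblB n)).getD i [] =
      pvFilt (pvPrimeTblB n) i (PySem.List.pyRange 2 (n + 1) 1) := by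
  exact getD_foldl_insert (fun i => (PySem.List.pyRange 2 (n + 1) 1).filter
      (fun j => PySem.List.pyGetD (pvPrimeTblB n) (i + j) false)) _ i
    (PySem.List.mem_pyRange_one.mpr ⟨h1, by omega⟩) (PySem.List.nodup_pyRange_one _ _) _

-- the tabulated primality bit is A's trial-division answer
lemma tbl_eq (n s : Int) (h0 : 0 ≤ s) (h1 : s < 2 * n + 2) :
    PySem.List.pyGetD (pvPrimeTblB n) s false = e_primoA s := by
  unfold pvPrimeTblB
  rw [PySem.List.pyGetD_map_pyRange_of_nonneg _ _ _ _ h0 h1]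
  exact (e_primo_eq s).symm

-- the state correspondence: A's usado array marks exactly the members of seq (at 2..n)
def pvInvB (n : Int) (usado : List Bool) (seq : List Int) : Prop :=
  (∃ t, seq = 1 :: t) ∧
  (∀ x ∈ seq, 1 ≤ x ∧ x ≤ n) ∧
  usado.length = (n + 1).toNat ∧
  (∀ i : Int, 2 ≤ i → i ≤ n → (PySem.List.pyGetD usado i false = true ↔ i ∈ seq))

lemma inv_push (n : Int) (usado : List Bool) (seq : List Int)
    (hinv : pvInvB n usado seq) (i : Int) (h2 : 2 ≤ i) (hn : i ≤ n) :
    pvInvB n (PySem.List.pySetD usado i true) (seq ++ [i]) := by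
  obtain ⟨⟨t, hseq⟩, hel, hlen, hcorr⟩ := hinv
  rw [PySem.List.pySetD_of_nonneg _ _ (by omega : (0:Int) ≤ i)]
  have hlen' : (usado.set i.toNat true).length = (n + 1).toNat := by simpa using hlen
  refine ⟨⟨t ++ [i], by rw [hseq]; rfl⟩, ?_, hlen', ?_⟩
  · intro x hx
    rcases List.mem_append.mp hx with h | h
    · exact hel x h
    · have : x = i := by simpa using h
      subst this; exact ⟨by omega, hn⟩
  · intro j hj2 hjn
    have hjlt : j < ((usado.set i.toNat true).length : Int) := by rw [hlen']; omega
    have hjlt' : j < (usado.length : Int) := by rw [hlen]; omega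
    rw [PySem.List.pyGetD_eq_getElem _ _ (by omega) hjlt]
    rw [List.getElem_set]
    by_cases hji : j = i
    · subst hji
      simp
    · have hne : i.toNat ≠ j.toNat := by omega
      rw [if_neg hne]
      rw [← PySem.List.pyGetD_eq_getElem usado false (by omega) hjlt']
      rw [hcorr j hj2 hjn]
      simp only [List.mem_append, List.mem_singleton]
      constructor
      · exact Or.inl
      · rintro (h | h)
        · exact h
        · exact absurd h hji

lemma inv_init (n : Int) (hn : 2 ≤ n) :
    pvInvB n (List.replicate (n + 1).toNat false) [1] := by
  refine ⟨⟨[], rfl⟩, ?_, by simp, ?_⟩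
  · intro x hx
    have : x = 1 := by simpa using hx
    subst this; exact ⟨le_refl _, by omega⟩
  · intro i hi2 hin
    have hlt : i < ((List.replicate (n + 1).toNat false).length : Int) := by simp; omega
    rw [PySem.List.pyGetD_eq_getElem _ _ (by omega) hlt, List.getElem_replicate]
    simp only [Bool.false_eq_true, false_iff, List.mem_singleton]
    omega

-- exact number of machine iterations B's run spends on a subtree of A's search
mutual
def pvStepsBt (n : Int) (fuel : Nat) (usado : List Bool) (seq : List Int) : Nat :=
  if PySem.List.len seq == n then 1 else
    match fuel with
    | 0 => 0
    | Nat.succ f => pvStepsLoop n f usado seq (PySem.List.pyRange 2 (n + 1) 1)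
termination_by (fuel, 0)

def pvStepsLoop (n : Int) (fuel : Nat) (usado : List Bool) (seq : List Int) : List Int → Nat
  | [] => 1
  | i :: rest =>
    if !(PySem.List.pyGetD usado i false) && e_primoA (PySem.List.pyGetD seq (-1) 0 + i) then
      1 + pvStepsBt n fuel (PySem.List.pySetD usado i true) (seq ++ [i]) +
        (match pvBtA n fuel (PySem.List.pySetD usado i true) (seq ++ [i]) with
         | some _ => 0
         | none => pvStepsLoop n fuel usado seq rest)
    else if e_primoA (PySem.List.pyGetD seq (-1) 0 + i) then
      1 + pvStepsLoop n fuel usado seq rest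
    else pvStepsLoop n fuel usado seq rest
termination_by cands => (fuel, cands.length + 1)
end

-- what the machine does right after popping the current level
def pvCont (n : Int) (prime : List Bool) (adj : PySem.Dict Int (List Int))
    (fuel : Nat) (S : List (List Int)) (seq : List Int) : Option (List Int) :=
  match S with
  | [] => none
  | _ :: _ => pvRunB n prime adj fuel S seq.dropLast

lemma run_nil (n : Int) (prime : List Bool) (adj : PySem.Dict Int (List Int))
    (fuel : Nat) (seq : List Int) : pvRunB n prime adj fuel [] seq = none := by
  cases fuel <;> rfl

lemma loop_sim (n : Int) (f : Nat)
    (ih : ∀ usado seq, pvInvB n usado seq → (n ≤ (seq.length : Int) + f) →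
      ((seq.length : Int) ≤ n) → ∀ fuel S,
      pvRunB n (pvPrimeTblB n) (pvAdjB n (pvPrimeTblB n))
          (pvStepsBt n f usado seq + fuel)
          (pvFilt (pvPrimeTblB n) (PySem.List.pyGetD seq (-1) 0)
            (PySem.List.pyRange 2 (n + 1) 1) :: S) seq
        = match pvBtA n f usado seq with
          | some s => some s
          | none => pvCont n (pvPrimeTblB n) (pvAdjB n (pvPrimeTblB n)) fuel S seq)
    (usado : List Bool) (seq : List Int) (hinv : pvInvB n usado seq)
    (hf : n ≤ (seq.length : Int) + 1 + f) (hlen : ((seq.length : Int)) < n) :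
    ∀ R, (∀ j ∈ R, 2 ≤ j ∧ j ≤ n) → ∀ fuel S,
    pvRunB n (pvPrimeTblB n) (pvAdjB n (pvPrimeTblB n))
        (pvStepsLoop n f usado seq R + fuel)
        (pvFilt (pvPrimeTblB n) (PySem.List.pyGetD seq (-1) 0) R :: S) seq
      = match pvLoopA n f usado seq R with
        | some s => some s
        | none => pvCont n (pvPrimeTblB n) (pvAdjB n (pvPrimeTblB n)) fuel S seq := by
  intro R
  induction R with
  | nil =>
    intro _ fuel S
    have hlf : (PySem.List.len seq == n) = false := by
      rw [PySem.List.len_eq, beq_eq_false_iff_ne]; intro h; omega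
    have hA : pvLoopA n f usado seq [] = none := by rw [pvLoopA]
    rw [hA]
    have hsteps : pvStepsLoop n f usado seq [] = 1 := by rw [pvStepsLoop]
    rw [hsteps, Nat.add_comm 1 fuel]
    show pvRunB n (pvPrimeTblB n) (pvAdjB n (pvPrimeTblB n)) (fuel + 1) ([] :: S) seq = _
    rw [pvRunB, hlf]
    simp only [Bool.false_and, Bool.false_eq_true, if_false, List.isEmpty_nil, Bool.not_true,
      Bool.and_false]
    cases S with
    | nil => simp [run_nil, pvCont]
    | cons a S' => simp [pvCont]
  | cons j R' ihR =>
    intro hb fuel S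
    obtain ⟨hj2, hjn⟩ := hb j List.mem_cons_self
    have hbR' : ∀ x ∈ R', 2 ≤ x ∧ x ≤ n := fun x hx => hb x (List.mem_cons_of_mem _ hx)
    have hne : seq ≠ [] := by obtain ⟨t, hseq⟩ := hinv.1; rw [hseq]; simp
    have hlastmem : PySem.List.pyGetD seq (-1) 0 ∈ seq := by
      rw [PySem.List.pyGetD_neg_one seq 0 hne]; exact List.getLast_mem hne
    obtain ⟨hl1, hln⟩ := hinv.2.1 _ hlastmem
    have htbl : PySem.List.pyGetD (pvPrimeTblB n) (PySem.List.pyGetD seq (-1) 0 + j) false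
        = e_primoA (PySem.List.pyGetD seq (-1) 0 + j) := tbl_eq n _ (by omega) (by omega)
    have hlf : (PySem.List.len seq == n) = false := by
      rw [PySem.List.len_eq, beq_eq_false_iff_ne]; intro h; omega
    have hdec : decide (PySem.List.len seq < n) = true := by
      rw [PySem.List.len_eq]; exact decide_eq_true hlen
    by_cases hp : e_primoA (PySem.List.pyGetD seq (-1) 0 + j) = true
    · have hfilt : pvFilt (pvPrimeTblB n) (PySem.List.pyGetD seq (-1) 0) (j :: R')
          = j :: pvFilt (pvPrimeTblB n) (PySem.List.pyGetD seq (-1) 0) R' := by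
        simp [pvFilt, htbl, hp]
      by_cases hu : PySem.List.pyGetD usado j false = true
      · -- candidate already used: one machine iteration skips it
        have hmem : j ∈ seq := (hinv.2.2.2 j hj2 hjn).mp hu
        have hcond : (!PySem.List.pyGetD usado j false
            && e_primoA (PySem.List.pyGetD seq (-1) 0 + j)) = false := by rw [hu]; simp
        have hA : pvLoopA n f usado seq (j :: R') = pvLoopA n f usado seq R' := by
          rw [pvLoopA, hcond]; simp
        have hsteps : pvStepsLoop n f usado seq (j :: R')
            = 1 + pvStepsLoop n f usado seq R' := by
          rw [pvStepsLoop, hcond]; simp [hp]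
        rw [hA, hsteps, hfilt]
        rw [show 1 + pvStepsLoop n f usado seq R' + fuel
            = (pvStepsLoop n f usado seq R' + fuel) + 1 from by omega]
        rw [pvRunB, hlf]
        have hcontains : seq.contains j = true := by simpa using hmem
        simp only [Bool.false_and, Bool.false_eq_true, if_false, hdec, List.isEmpty_cons,
          Bool.not_false, Bool.and_self, if_true, List.headD_cons, List.tail_cons, hcontains]
        exact ihR hbR' fuel S
      · -- fresh candidate: descend
        have hu' : PySem.List.pyGetD usado j false = false := by
          revert hu; cases PySem.List.pyGetD usado j false <;> simp
        have hnotmem : j ∉ seq := by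
          intro h
          have := (hinv.2.2.2 j hj2 hjn).mpr h
          rw [hu'] at this
          simp at this
        have hcontains : seq.contains j = false := by
          cases h : seq.contains j
          · rfl
          · exact absurd (by simpa using h) hnotmem
        have hcond : (!PySem.List.pyGetD usado j false
            && e_primoA (PySem.List.pyGetD seq (-1) 0 + j)) = true := by
          rw [hu', hp]; rfl
        have hA : pvLoopA n f usado seq (j :: R')
            = match pvBtA n f (PySem.List.pySetD usado j true) (seq ++ [j]) with
              | some s => some s
              | none => pvLoopA n f usado seq R' := by
          rw [pvLoopA, hcond]; simp
        have hinv' := inv_push n usado seq hinv j hj2 hjn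
        have hlen' : (((seq ++ [j]).length : Int)) ≤ n := by
          simp; omega
        have hf' : n ≤ ((seq ++ [j]).length : Int) + f := by
          simp; omega
        have hstep := ih (PySem.List.pySetD usado j true) (seq ++ [j]) hinv' hf' hlen'
        cases hbt : pvBtA n f (PySem.List.pySetD usado j true) (seq ++ [j]) with
        | some s =>
          have hsteps : pvStepsLoop n f usado seq (j :: R')
              = 1 + pvStepsBt n f (PySem.List.pySetD usado j true) (seq ++ [j]) := by
            rw [pvStepsLoop, hcond, hbt]; simp
          rw [hA, hbt, hsteps, hfilt]
          rw [show 1 + pvStepsBt n f (PySem.List.pySetD usado j true) (seq ++ [j]) + fuel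
              = (pvStepsBt n f (PySem.List.pySetD usado j true) (seq ++ [j]) + fuel) + 1
              from by omega]
          rw [pvRunB, hlf]
          simp only [Bool.false_and, Bool.false_eq_true, if_false, hdec, List.isEmpty_cons,
            Bool.not_false, Bool.and_self, if_true, List.headD_cons, List.tail_cons, hcontains]
          rw [adj_getD n j (by omega) hjn]
          have h2 := hstep fuel
            (pvFilt (pvPrimeTblB n) (PySem.List.pyGetD seq (-1) 0) R' :: S)
          rw [PySem.List.pyGetD_neg_one_append_singleton, hbt] at h2
          simpa using h2
        | none =>
          have hsteps : pvStepsLoop n f usado seq (j :: R')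
              = 1 + pvStepsBt n f (PySem.List.pySetD usado j true) (seq ++ [j])
                + pvStepsLoop n f usado seq R' := by
            rw [pvStepsLoop, hcond, hbt]; simp
          rw [hA, hbt, hsteps, hfilt]
          rw [show 1 + pvStepsBt n f (PySem.List.pySetD usado j true) (seq ++ [j])
                + pvStepsLoop n f usado seq R' + fuel
              = (pvStepsBt n f (PySem.List.pySetD usado j true) (seq ++ [j])
                + (pvStepsLoop n f usado seq R' + fuel)) + 1 from by omega]
          rw [pvRunB, hlf]
          simp only [Bool.false_and, Bool.false_eq_true, if_false, hdec, List.isEmpty_cons,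
            Bool.not_false, Bool.and_self, if_true, List.headD_cons, List.tail_cons, hcontains]
          rw [adj_getD n j (by omega) hjn]
          have h2 := hstep (pvStepsLoop n f usado seq R' + fuel)
            (pvFilt (pvPrimeTblB n) (PySem.List.pyGetD seq (-1) 0) R' :: S)
          rw [PySem.List.pyGetD_neg_one_append_singleton, hbt] at h2
          simp only [pvCont] at h2
          rw [show (seq ++ [j]).dropLast = seq from by
            simpa using List.dropLast_concat (l := seq) (b := j)] at h2
          rw [h2]
          simpa using ihR hbR' fuel S
    · -- non-prime sum: no machine iteration, A's test fails
      have hp' : e_primoA (PySem.List.pyGetD seq (-1) 0 + j) = false := by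
        revert hp; cases e_primoA (PySem.List.pyGetD seq (-1) 0 + j) <;> simp
      have hfilt : pvFilt (pvPrimeTblB n) (PySem.List.pyGetD seq (-1) 0) (j :: R')
          = pvFilt (pvPrimeTblB n) (PySem.List.pyGetD seq (-1) 0) R' := by
        simp [pvFilt, htbl, hp']
      have hcond : (!PySem.List.pyGetD usado j false
          && e_primoA (PySem.List.pyGetD seq (-1) 0 + j)) = false := by
        rw [hp']; simp
      have hA : pvLoopA n f usado seq (j :: R') = pvLoopA n f usado seq R' := by
        rw [pvLoopA, hcond]; simp
      have hsteps : pvStepsLoop n f usado seq (j :: R')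
          = pvStepsLoop n f usado seq R' := by
        rw [pvStepsLoop, hcond, hp']; simp
      rw [hA, hsteps, hfilt]
      exact ihR hbR' fuel S

-- the len(seq) == n closing step, shared by both fuel cases of bt_sim
lemma bt_base (n : Int) (hn : 2 ≤ n) (f : Nat) (usado : List Bool) (seq : List Int)
    (hinv : pvInvB n usado seq) (hEq : ((seq.length : Int)) = n) (fuel : Nat)
    (S : List (List Int)) :
    pvRunB n (pvPrimeTblB n) (pvAdjB n (pvPrimeTblB n))
        (pvStepsBt n f usado seq + fuel)
        (pvFilt (pvPrimeTblB n) (PySem.List.pyGetD seq (-1) 0)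
          (PySem.List.pyRange 2 (n + 1) 1) :: S) seq
      = match pvBtA n f usado seq with
        | some s => some s
        | none => pvCont n (pvPrimeTblB n) (pvAdjB n (pvPrimeTblB n)) fuel S seq := by
  have hne : seq ≠ [] := by obtain ⟨t, hseq⟩ := hinv.1; rw [hseq]; simp
  have hlastmem : PySem.List.pyGetD seq (-1) 0 ∈ seq := by
    rw [PySem.List.pyGetD_neg_one seq 0 hne]; exact List.getLast_mem hne
  obtain ⟨hl1, hln⟩ := hinv.2.1 _ hlastmem
  have hfirst : PySem.List.pyGetD seq 0 0 = 1 := by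
    obtain ⟨t, hseq⟩ := hinv.1
    rw [hseq]
    exact PySem.List.pyGetD_zero_cons 1 t 0
  have htbl : PySem.List.pyGetD (pvPrimeTblB n)
      (PySem.List.pyGetD seq (-1) 0 + PySem.List.pyGetD seq 0 0) false
      = e_primoA (PySem.List.pyGetD seq (-1) 0 + PySem.List.pyGetD seq 0 0) := by
    rw [hfirst]; exact tbl_eq n _ (by omega) (by omega)
  have hlf : (PySem.List.len seq == n) = true := by
    rw [PySem.List.len_eq]; exact beq_iff_eq.mpr hEq
  have hdec : decide (PySem.List.len seq < n) = false := by
    rw [PySem.List.len_eq]; simp; omega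
  have hsteps : pvStepsBt n f usado seq = 1 := by rw [pvStepsBt.eq_def, hlf]; simp
  rw [hsteps, Nat.add_comm 1 fuel, pvBtA.eq_def, hlf, pvRunB, hlf, htbl]
  simp only [if_true]
  cases hp : e_primoA (PySem.List.pyGetD seq (-1) 0 + PySem.List.pyGetD seq 0 0) with
  | true => simp
  | false =>
    simp only [Bool.and_false, Bool.false_eq_true, if_false, hdec, Bool.false_and]
    cases S with
    | nil => simp [run_nil, pvCont]
    | cons a S' => simp [pvCont]

lemma bt_sim (n : Int) (hn : 2 ≤ n) : ∀ (f : Nat) (usado : List Bool) (seq : List Int),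
    pvInvB n usado seq → (n ≤ (seq.length : Int) + f) → ((seq.length : Int) ≤ n) →
    ∀ fuel S,
    pvRunB n (pvPrimeTblB n) (pvAdjB n (pvPrimeTblB n))
        (pvStepsBt n f usado seq + fuel)
        (pvFilt (pvPrimeTblB n) (PySem.List.pyGetD seq (-1) 0)
          (PySem.List.pyRange 2 (n + 1) 1) :: S) seq
      = match pvBtA n f usado seq with
        | some s => some s
        | none => pvCont n (pvPrimeTblB n) (pvAdjB n (pvPrimeTblB n)) fuel S seq := by
  intro f
  induction f with
  | zero =>
    intro usado seq hinv hf hlen fuel S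
    exact bt_base n hn 0 usado seq hinv (by omega) fuel S
  | succ f ihf =>
    intro usado seq hinv hf hlen fuel S
    by_cases hEq : ((seq.length : Int)) = n
    · exact bt_base n hn (f + 1) usado seq hinv hEq fuel S
    · have hlt : ((seq.length : Int)) < n := lt_of_le_of_ne hlen hEq
      have hlf : (PySem.List.len seq == n) = false := by
        rw [PySem.List.len_eq, beq_eq_false_iff_ne]; exact hEq
      have hsteps : pvStepsBt n (f + 1) usado seq
          = pvStepsLoop n f usado seq (PySem.List.pyRange 2 (n + 1) 1) := by
        rw [pvStepsBt.eq_def, hlf]; simp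
      have hA : pvBtA n (f + 1) usado seq
          = pvLoopA n f usado seq (PySem.List.pyRange 2 (n + 1) 1) := by
        rw [pvBtA.eq_def, hlf]; simp
      rw [hsteps, hA]
      exact loop_sim n f ihf usado seq hinv (by omega) hlt
        (PySem.List.pyRange 2 (n + 1) 1)
        (fun j hj => by
          have := PySem.List.mem_pyRange_one.mp hj
          exact ⟨this.1, by omega⟩) fuel S

lemma loop_bound (n : Int) (f : Nat) (P : Nat)
    (hbt : ∀ usado seq, pvStepsBt n f usado seq ≤ P) :
    ∀ usado seq R, pvStepsLoop n f usado seq R ≤ 1 + R.length * (1 + P) := by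
  intro usado seq R
  induction R with
  | nil => simp [pvStepsLoop]
  | cons i rest ihR =>
    rw [pvStepsLoop]
    have hlen : (i :: rest).length * (1 + P) = rest.length * (1 + P) + (1 + P) := by
      rw [List.length_cons, Nat.succ_mul]
    split_ifs with h1 h2
    · have hsb := hbt (PySem.List.pySetD usado i true) (seq ++ [i])
      cases hbt' : pvBtA n f (PySem.List.pySetD usado i true) (seq ++ [i]) with
      | some s => simp only []; omega
      | none => simp only []; omega
    · omega
    · omega

lemma bt_bound (n : Int) :
    ∀ (f : Nat) (usado : List Bool) (seq : List Int),
    pvStepsBt n f usado seq ≤ ((PySem.List.pyRange 2 (n + 1) 1).length + 2) ^ (f + 1) := by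
  intro f
  induction f with
  | zero =>
    intro usado seq
    rw [pvStepsBt]
    split_ifs
    · simp [pow_succ]
    · simp
  | succ f ihf =>
    intro usado seq
    rw [pvStepsBt]
    set m := (PySem.List.pyRange 2 (n + 1) 1).length with hm
    set P := (m + 2) ^ (f + 1) with hP
    have hP2 : m + 2 ≤ P := Nat.le_self_pow (Nat.succ_ne_zero f) (m + 2)
    have hpow : (m + 2) ^ (f + 1 + 1) = m * P + 2 * P := by rw [pow_succ]; ring
    split_ifs
    · omega
    · have := loop_bound n f P ihf usado seq (PySem.List.pyRange 2 (n + 1) 1)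
      rw [Nat.mul_add, Nat.mul_one] at this
      rw [← hm] at this
      omega

-- ===== VERDICT (by name: the statement is the Claim_ definition above) =====
theorem anel_spec : Claim_equal_anel := by
  unfold Claim_equal_anel
  intro n _
  unfold Spec_anel anel anel_alt
  by_cases hodd : (PySem.Int.mod n 2 != 0) = true
  · simp only [hodd, if_true]
  · simp only [hodd, Bool.false_eq_true, if_false]
    have heven : (2 : Int) ∣ n := by
      rw [← PySem.Int.mod_eq_zero_iff_dvd]
      simpa using hodd
    by_cases hn : 2 ≤ n
    · have hinv := inv_init n hn
      have hsle : pvStepsBt n (n.toNat + 1) (List.replicate (n + 1).toNat false) [1]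
          ≤ (n.toNat + 2) ^ (n.toNat + 2) := by
        have h1 := bt_bound n (n.toNat + 1) (List.replicate (n + 1).toNat false) [1]
        have hm : (PySem.List.pyRange 2 (n + 1) 1).length + 2 ≤ n.toNat + 2 := by
          rw [PySem.List.length_pyRange_one]; omega
        calc pvStepsBt n (n.toNat + 1) (List.replicate (n + 1).toNat false) [1]
            ≤ ((PySem.List.pyRange 2 (n + 1) 1).length + 2) ^ (n.toNat + 1 + 1) := h1
          _ ≤ (n.toNat + 2) ^ (n.toNat + 1 + 1) := Nat.pow_le_pow_left hm _
      rw [show (n.toNat + 2) ^ (n.toNat + 2)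
          = pvStepsBt n (n.toNat + 1) (List.replicate (n + 1).toNat false) [1]
            + ((n.toNat + 2) ^ (n.toNat + 2)
              - pvStepsBt n (n.toNat + 1) (List.replicate (n + 1).toNat false) [1])
          from by omega]
      rw [adj_getD n 1 (by omega) (by omega)]
      have h := bt_sim n hn (n.toNat + 1) (List.replicate (n + 1).toNat false) [1] hinv
        (by simp; omega) (by simp; omega)
        ((n.toNat + 2) ^ (n.toNat + 2)
          - pvStepsBt n (n.toNat + 1) (List.replicate (n + 1).toNat false) [1]) []
      have hlast : PySem.List.pyGetD ([1] : List Int) (-1) 0 = 1 := by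
        rw [PySem.List.pyGetD_neg_one ([1] : List Int) 0 (by simp)]
        simp
      rw [hlast] at h
      rw [h]
      cases hbt : pvBtA n (n.toNat + 1) (List.replicate (n + 1).toNat false) [1] with
      | some s => simp
      | none => simp [pvCont]
    · have hn0 : n ≤ 0 := by
        obtain ⟨k, hk⟩ := heven
        omega
      have hl : ((PySem.List.len ([1] : List Int)) == n) = false := by
        rw [PySem.List.len_eq, beq_eq_false_iff_ne]
        simp only [List.length_cons, List.length_nil]
        intro hc
        omega
      have hA : pvBtA n (n.toNat + 1) (List.replicate (n + 1).toNat false) [1] = none := by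
        rw [pvBtA.eq_def]
        simp only [hl, Bool.false_eq_true, if_false]
        rw [show n.toNat = 0 from Int.toNat_of_nonpos hn0]
        rw [PySem.List.pyRange_one_eq_nil (by omega : n + 1 ≤ 2)]
        rw [pvLoopA]
      rw [hA]
      have hadj : pvAdjB n (pvPrimeTblB n) = PySem.Dict.empty := by
        unfold pvAdjB
        rw [PySem.List.pyRange_one_eq_nil (by omega : n + 1 ≤ 1)]
        rfl
      rw [hadj, PySem.Dict.getD_empty]
      rw [show n.toNat = 0 from Int.toNat_of_nonpos hn0]
      rw [show ((0 : Nat) + 2) ^ ((0 : Nat) + 2) = 3 + 1 from by norm_num]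
      rw [pvRunB, hl]
      simp only [Bool.false_and, Bool.false_eq_true, if_false, List.isEmpty_nil,
        Bool.not_true, Bool.and_false, if_true, run_nil]
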